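-- pv_equiv track=rewrite | github.com/mayhemphone/DidYouForget | scrape_voting_records.py | grab_after_last_char
-- ===== SOURCE A (Python) =====
-- def grab_after_last_char(char, input_name):
--     index = 0
--     last_space_index = None
--     for character in input_name:
--         if character == char:
--             last_space_index = index + 1
--         index = index + 1
--     return input_name[last_space_index:]
-- ===== SOURCE B (Python) =====
-- def grab_after_last_char(char, input_name):
--     # Reverse scan: first match from the end is the last occurrence.
--     for i in range(len(input_name) - 1, -1, -1):
--         if input_name[i] == char:
--             return input_name[i + 1:]
--     return input_name
-- ===== Notes on version B (the rewrite author's own statement) =====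
-- stated objective: alternative
-- what changed: Instead of a full forward pass maintaining index counters and a last-match slot, B scans backwards from the end and returns the suffix at the first match, stopping early; element-wise comparison keeps empty/multi-char `char` never matching, as in A.
import Mathlib
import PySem

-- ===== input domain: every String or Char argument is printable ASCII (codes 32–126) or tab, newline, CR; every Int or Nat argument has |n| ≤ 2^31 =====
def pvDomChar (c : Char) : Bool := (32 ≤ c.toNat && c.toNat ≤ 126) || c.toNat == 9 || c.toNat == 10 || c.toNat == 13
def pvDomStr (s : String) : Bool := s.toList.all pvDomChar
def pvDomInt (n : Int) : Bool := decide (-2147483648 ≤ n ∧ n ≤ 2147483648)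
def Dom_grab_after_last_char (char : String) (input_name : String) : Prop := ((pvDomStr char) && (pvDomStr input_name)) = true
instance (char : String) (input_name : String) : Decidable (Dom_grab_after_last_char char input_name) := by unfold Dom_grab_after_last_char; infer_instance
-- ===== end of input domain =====

-- B scans backwards and returns the suffix at the first (= last) match; A does a full forward pass
-- tracking a last-match index. Equivalence of return values is proved on the whole domain.

-- ===== PORT A =====
-- forward pass: state = (index, last_space_index); then input_name[last_space_index:]
def grab_after_last_char (char : String) (input_name : String) : String :=
  let st := input_name.toList.foldl
    (fun (st : Int × Option Int) (character : Char) =>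
      (st.1 + 1, if String.ofList [character] = char then some (st.1 + 1) else st.2))
    ((0 : Int), (none : Option Int))
  PySem.Str.slice input_name st.2 none

-- ===== PORT B =====
-- reverse scan: the recursion inspects the tail first (the end of the string),
-- so the first hit found is the last occurrence; its tail `rest` is input_name[i+1:].
def grabAltScan (char : String) : List Char → Option (List Char)
  | [] => none
  | c :: rest =>
    match grabAltScan char rest with
    | some s => some s
    | none => if String.ofList [c] = char then some rest else none

def grab_after_last_char_alt (char : String) (input_name : String) : String :=
  match grabAltScan char input_name.toList with
  | some s => String.ofList s
  | none => input_name

-- ===== PRECONDITION & SPEC =====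
def Spec_grab_after_last_char (char : String) (input_name : String) (out : String) : Prop := out = grab_after_last_char_alt char input_name
instance (char : String) (input_name : String) (out : String) : Decidable (Spec_grab_after_last_char char input_name out) := by unfold Spec_grab_after_last_char; infer_instance

-- ===== CLAIM (what is proved, stated in full; the proofs are below) =====
def Claim_equal_grab_after_last_char : Prop := ∀ (char : String) (input_name : String), Dom_grab_after_last_char char input_name → Spec_grab_after_last_char char input_name (grab_after_last_char char input_name)

-- ===== LEMMAS AND PROOFS =====

-- the scan result is a suffix: it can be recovered by dropping the right number of chars
theorem grabAltScan_drop (char : String) (cs : List Char) (s : List Char)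
    (h : grabAltScan char cs = some s) :
    s.length ≤ cs.length ∧ cs.drop (cs.length - s.length) = s := by
  induction cs with
  | nil => simp [grabAltScan] at h
  | cons c rest ih =>
    simp only [grabAltScan] at h
    cases hrec : grabAltScan char rest with
    | some t =>
      rw [hrec] at h
      rw [Option.some.inj h] at hrec
      obtain ⟨hle, hdrop⟩ := ih hrec
      refine ⟨le_trans hle (by simp), ?_⟩
      have h1 : (c :: rest).length - s.length = (rest.length - s.length) + 1 := by
        simp only [List.length_cons]; omega
      rw [h1, List.drop_succ_cons, hdrop]
    | none =>
      rw [hrec] at h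
      split_ifs at h with hc
      · have h' := Option.some.inj h
        subst h'
        refine ⟨by simp, ?_⟩
        have h1 : (c :: rest).length - rest.length = 1 := by
          simp only [List.length_cons]; omega
        rw [h1]
        rfl

-- A's fold computes exactly the last-match index B's scan encodes
theorem foldA_eq (char : String) (cs : List Char) (n : Int) (acc : Option Int) :
    cs.foldl
      (fun (st : Int × Option Int) (character : Char) =>
        (st.1 + 1, if String.ofList [character] = char then some (st.1 + 1) else st.2))
      (n, acc)
    = (n + cs.length,
       match grabAltScan char cs with
       | some s => some (n + cs.length - s.length)
       | none => acc) := by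
  induction cs generalizing n acc with
  | nil => simp [grabAltScan]
  | cons c rest ih =>
    simp only [List.foldl_cons]
    rw [ih]
    simp only [grabAltScan, List.length_cons]
    cases hrec : grabAltScan char rest with
    | some t =>
      refine Prod.ext (by push_cast; ring) ?_
      simp only; congr 1; push_cast; ring
    | none =>
      split_ifs with hc
      · refine Prod.ext (by push_cast; ring) ?_
        simp only; congr 1; push_cast; ring
      · exact Prod.ext (by push_cast; ring) rfl

-- ===== VERDICT (by name: the statement is the Claim_ definition above) =====
theorem grab_after_last_char_spec : Claim_equal_grab_after_last_char := by
  intro char input_name _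
  unfold Spec_grab_after_last_char grab_after_last_char grab_after_last_char_alt
  rw [foldA_eq]
  cases hscan : grabAltScan char input_name.toList with
  | none =>
    -- no match: input_name[None:] = input_name
    apply String.toList_inj.mp
    simp [PySem.Str.toList_slice, PySem.List.slice_none_none]
  | some s =>
    obtain ⟨hle, hdrop⟩ := grabAltScan_drop char input_name.toList s hscan
    apply String.toList_inj.mp
    have hcast : (0 : Int) + (input_name.toList.length : Int) - (s.length : Int)
        = ((input_name.toList.length - s.length : Nat) : Int) := by omega
    simp only [hcast, PySem.Str.toList_slice, String.toList_ofList]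
    simpa [PySem.List.slice_from_natCast] using hdrop
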